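-- pv_equiv track=rewrite | github.com/EdSalisbury/mkv_shrink | mkv_shrink/shrink.py | filter_streams_by_language
-- ===== SOURCE A (Python) =====
-- def filter_streams_by_language(
--     streams: list[dict], allowed_langs=("eng", "jpn")
-- ) -> dict:
--     """
--     Filter streams by language.
--     Returns dict with 'video', 'audio', 'subs', 'other' containing lists of stream indexes.
--     """
--     selected = {"video": [], "audio": [], "subs": [], "other": []}
--
--     for s in streams:
--         stype = s.get("type")
--         lang = (s.get("language") or "und").lower()
--
--         if stype == "video":
--             selected["video"].append(s["index"])
--         elif stype == "audio":
--             if lang in allowed_langs: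
--                 selected["audio"].append(s["index"])
--         elif stype == "subtitle":
--             if lang in allowed_langs:
--                 selected["subs"].append(s["index"])
--         else:
--             selected["other"].append(s["index"])
--
--     return selected
-- ===== SOURCE B (Python) =====
-- def filter_streams_by_language(
--     streams: list[dict], allowed_langs=("eng", "jpn")
-- ) -> dict:
--     """Four filtered passes instead of one dispatch loop."""
--
--     def lang(s):
--         return (s.get("language") or "und").lower()
--
--     return {
--         "video": [s["index"] for s in streams if s.get("type") == "video"],
--         "audio": [
--             s["index"]
--             for s in streams
--             if s.get("type") == "audio" and lang(s) in allowed_langs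
--         ],
--         "subs": [
--             s["index"]
--             for s in streams
--             if s.get("type") == "subtitle" and lang(s) in allowed_langs
--         ],
--         "other": [
--             s["index"]
--             for s in streams
--             if s.get("type") not in ("video", "audio", "subtitle")
--         ],
--     }
-- ===== Notes on version B (the rewrite author's own statement) =====
-- stated objective: alternative
-- what changed: Replaces the single dispatch loop that appends into a mutable four-key dict with four independent filter+map comprehensions whose results are assembled into the dict directly.
import Mathlib
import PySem

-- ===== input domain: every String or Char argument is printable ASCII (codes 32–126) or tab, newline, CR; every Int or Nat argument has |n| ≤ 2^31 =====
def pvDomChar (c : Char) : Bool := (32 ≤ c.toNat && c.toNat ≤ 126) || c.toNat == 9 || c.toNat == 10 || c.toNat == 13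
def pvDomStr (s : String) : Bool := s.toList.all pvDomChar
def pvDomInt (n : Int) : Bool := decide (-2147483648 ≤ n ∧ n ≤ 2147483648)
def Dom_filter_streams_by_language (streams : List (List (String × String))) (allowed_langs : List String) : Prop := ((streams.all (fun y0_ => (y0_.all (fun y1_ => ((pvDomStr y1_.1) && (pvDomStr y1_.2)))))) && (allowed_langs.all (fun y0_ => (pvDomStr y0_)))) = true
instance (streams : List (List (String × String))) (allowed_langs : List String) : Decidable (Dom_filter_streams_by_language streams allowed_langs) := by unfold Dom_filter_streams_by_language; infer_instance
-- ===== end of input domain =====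

-- B rebuilds the four index lists by four independent filtered passes instead of A's single
-- dispatch loop into a mutable dict; same cost, different decomposition (objective: alternative).


-- ===== PORT A =====
-- s.get(k)  (first match, as in a Python dict built in insertion order)
def pvGetA (s : List (String × String)) (k : String) : Option String :=
  (PySem.Dict.mk s).get? k

-- (s.get("language") or "und").lower()  ('or' treats the empty string as falsy)
def pvLangA (s : List (String × String)) : String :=
  match pvGetA s "language" with
  | none => PySem.Str.lower "und"
  | some v => if v == "" then PySem.Str.lower "und" else PySem.Str.lower v

-- s["index"]; total stand-in: "" where Python raises KeyError (those inputs are outside Pre_)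
def pvIdxA (s : List (String × String)) : String :=
  (PySem.Dict.mk s).getD "index" ""

-- one iteration of A's for-loop over the mutable four-key dict
def pvStepA (allowed_langs : List String) (sel : PySem.Dict String (List String))
    (s : List (String × String)) : PySem.Dict String (List String) :=
  let stype := pvGetA s "type"
  let lang := pvLangA s
  if stype == some "video" then sel.modify "video" [] (· ++ [pvIdxA s])
  else if stype == some "audio" then
    (if allowed_langs.contains lang then sel.modify "audio" [] (· ++ [pvIdxA s]) else sel)
  else if stype == some "subtitle" then
    (if allowed_langs.contains lang then sel.modify "subs" [] (· ++ [pvIdxA s]) else sel)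
  else sel.modify "other" [] (· ++ [pvIdxA s])

def filter_streams_by_language (streams : List (List (String × String))) (allowed_langs : List String) : List (String × List String) :=
  (streams.foldl (pvStepA allowed_langs)
    (PySem.Dict.mk [("video", []), ("audio", []), ("subs", []), ("other", [])])).items

-- ===== PORT B =====
def pvGetB (s : List (String × String)) (k : String) : Option String :=
  (PySem.Dict.mk s).get? k

def pvLangB (s : List (String × String)) : String :=
  match pvGetB s "language" with
  | none => PySem.Str.lower "und"
  | some v => if v == "" then PySem.Str.lower "und" else PySem.Str.lower v

def pvIdxB (s : List (String × String)) : String :=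
  (PySem.Dict.mk s).getD "index" ""

def filter_streams_by_language_alt (streams : List (List (String × String))) (allowed_langs : List String) : List (String × List String) :=
  [("video", (streams.filter (fun s => pvGetB s "type" == some "video")).map pvIdxB),
   ("audio", (streams.filter (fun s =>
      pvGetB s "type" == some "audio" && allowed_langs.contains (pvLangB s))).map pvIdxB),
   ("subs", (streams.filter (fun s =>
      pvGetB s "type" == some "subtitle" && allowed_langs.contains (pvLangB s))).map pvIdxB),
   ("other", (streams.filter (fun s =>
      !(pvGetB s "type" == some "video" || pvGetB s "type" == some "audio" ||
        pvGetB s "type" == some "subtitle"))).map pvIdxB)]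

-- ===== PRECONDITION & SPEC =====
-- whether A's loop appends this stream's s["index"] somewhere (the only place it can raise)
def pvSelected (s : List (String × String)) (allowed_langs : List String) : Bool :=
  let t := (PySem.Dict.mk s).get? "type"
  if t == some "audio" || t == some "subtitle" then allowed_langs.contains (pvLangA s)
  else true

-- Pre_ excludes exactly the inputs on which A raises KeyError: a stream that the loop
-- appends (video, other, or audio/subtitle with an allowed language) but with no "index" key.
def Pre_filter_streams_by_language (streams : List (List (String × String))) (allowed_langs : List String) : Prop :=
  (streams.all (fun s => !(pvSelected s allowed_langs) || (PySem.Dict.mk s).contains "index")) = true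
instance (streams : List (List (String × String))) (allowed_langs : List String) : Decidable (Pre_filter_streams_by_language streams allowed_langs) := by unfold Pre_filter_streams_by_language; infer_instance

def pvWitness_filter_streams_by_language : (List (List (String × String))) × List String :=
  ([[("type", "video"), ("index", "0")], [("type", "audio"), ("language", "ENG"), ("index", "1")],
    [("type", "subtitle"), ("index", "2")], [("index", "3")]], ["eng", "und"])

def Spec_filter_streams_by_language (streams : List (List (String × String))) (allowed_langs : List String) (out : List (String × List String)) : Prop := out = filter_streams_by_language_alt streams allowed_langs
instance (streams : List (List (String × String))) (allowed_langs : List String) (out : List (String × List String)) : Decidable (Spec_filter_streams_by_language streams allowed_langs out) := by unfold Spec_filter_streams_by_language; infer_instance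

-- ===== CLAIM (what is proved, stated in full; the proofs are below) =====
def Claim_equal_filter_streams_by_language : Prop := ∀ (streams : List (List (String × String))) (allowed_langs : List String), Dom_filter_streams_by_language streams allowed_langs → Pre_filter_streams_by_language streams allowed_langs → Spec_filter_streams_by_language streams allowed_langs (filter_streams_by_language streams allowed_langs)

-- ===== LEMMAS AND PROOFS =====
-- A's and B's per-stream helpers are definitionally the same functions.
theorem pvGetAB : pvGetA = pvGetB := rfl
theorem pvLangAB : pvLangA = pvLangB := rfl
theorem pvIdxAB : pvIdxA = pvIdxB := rfl

-- Loop invariant: folding A's step from any four-list state appends exactly B's four filtered lists.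
theorem foldA_spec (allowed_langs : List String) (streams : List (List (String × String)))
    (v a u o : List String) :
    streams.foldl (pvStepA allowed_langs)
      (PySem.Dict.mk [("video", v), ("audio", a), ("subs", u), ("other", o)]) =
    PySem.Dict.mk
      [("video", v ++ (streams.filter (fun s => pvGetB s "type" == some "video")).map pvIdxB),
       ("audio", a ++ (streams.filter (fun s =>
          pvGetB s "type" == some "audio" && allowed_langs.contains (pvLangB s))).map pvIdxB),
       ("subs", u ++ (streams.filter (fun s =>
          pvGetB s "type" == some "subtitle" && allowed_langs.contains (pvLangB s))).map pvIdxB),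
       ("other", o ++ (streams.filter (fun s =>
          !(pvGetB s "type" == some "video" || pvGetB s "type" == some "audio" ||
            pvGetB s "type" == some "subtitle"))).map pvIdxB)] := by
  induction streams generalizing v a u o with
  | nil => simp
  | cons s rest ih =>
    rw [List.foldl_cons]
    by_cases hv : pvGetA s "type" = some "video"
    · rw [show pvStepA allowed_langs
          (PySem.Dict.mk [("video", v), ("audio", a), ("subs", u), ("other", o)]) s =
          PySem.Dict.mk [("video", v ++ [pvIdxA s]), ("audio", a), ("subs", u), ("other", o)] from by
        simp [pvStepA, hv, PySem.Dict.modify, PySem.Dict.get?, PySem.Dict.insert, PySem.Dict.getD]]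
      rw [ih]
      have hvB : pvGetB s "type" = some "video" := pvGetAB ▸ hv
      simp [hvB, ← pvIdxAB]
    · by_cases ha : pvGetA s "type" = some "audio"
      · by_cases hl : allowed_langs.contains (pvLangA s)
        · have hl' : pvLangA s ∈ allowed_langs := by simpa using hl
          rw [show pvStepA allowed_langs
              (PySem.Dict.mk [("video", v), ("audio", a), ("subs", u), ("other", o)]) s =
              PySem.Dict.mk [("video", v), ("audio", a ++ [pvIdxA s]), ("subs", u), ("other", o)] from by
            simp [pvStepA, ha, hl', PySem.Dict.modify, PySem.Dict.get?, PySem.Dict.insert,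
              PySem.Dict.getD]]
          rw [ih]
          have haB : pvGetB s "type" = some "audio" := pvGetAB ▸ ha
          have hlB : pvLangB s ∈ allowed_langs := pvLangAB ▸ hl'
          simp [haB, hlB, ← pvIdxAB]
        · have hl' : ¬ pvLangA s ∈ allowed_langs := by simpa using hl
          rw [show pvStepA allowed_langs
              (PySem.Dict.mk [("video", v), ("audio", a), ("subs", u), ("other", o)]) s =
              PySem.Dict.mk [("video", v), ("audio", a), ("subs", u), ("other", o)] from by
            simp [pvStepA, ha, hl']]
          rw [ih]
          have haB : pvGetB s "type" = some "audio" := pvGetAB ▸ ha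
          have hlB : ¬ pvLangB s ∈ allowed_langs := pvLangAB ▸ hl'
          simp [haB, hlB]
      · by_cases hs : pvGetA s "type" = some "subtitle"
        · by_cases hl : allowed_langs.contains (pvLangA s)
          · have hl' : pvLangA s ∈ allowed_langs := by simpa using hl
            rw [show pvStepA allowed_langs
                (PySem.Dict.mk [("video", v), ("audio", a), ("subs", u), ("other", o)]) s =
                PySem.Dict.mk [("video", v), ("audio", a), ("subs", u ++ [pvIdxA s]), ("other", o)] from by
              simp [pvStepA, hs, hl', PySem.Dict.modify, PySem.Dict.get?, PySem.Dict.insert,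
                PySem.Dict.getD]]
            rw [ih]
            have hsB : pvGetB s "type" = some "subtitle" := pvGetAB ▸ hs
            have hlB : pvLangB s ∈ allowed_langs := pvLangAB ▸ hl'
            simp [hsB, hlB, ← pvIdxAB]
          · have hl' : ¬ pvLangA s ∈ allowed_langs := by simpa using hl
            rw [show pvStepA allowed_langs
                (PySem.Dict.mk [("video", v), ("audio", a), ("subs", u), ("other", o)]) s =
                PySem.Dict.mk [("video", v), ("audio", a), ("subs", u), ("other", o)] from by
              simp [pvStepA, hs, hl']]
            rw [ih]
            have hsB : pvGetB s "type" = some "subtitle" := pvGetAB ▸ hs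
            have hlB : ¬ pvLangB s ∈ allowed_langs := pvLangAB ▸ hl'
            simp [hsB, hlB]
        · rw [show pvStepA allowed_langs
              (PySem.Dict.mk [("video", v), ("audio", a), ("subs", u), ("other", o)]) s =
              PySem.Dict.mk [("video", v), ("audio", a), ("subs", u), ("other", o ++ [pvIdxA s])] from by
            simp [pvStepA, hv, ha, hs, PySem.Dict.modify, PySem.Dict.get?, PySem.Dict.insert,
              PySem.Dict.getD]]
          rw [ih]
          have hvB : ¬ pvGetB s "type" = some "video" := pvGetAB ▸ hv
          have haB : ¬ pvGetB s "type" = some "audio" := pvGetAB ▸ ha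
          have hsB : ¬ pvGetB s "type" = some "subtitle" := pvGetAB ▸ hs
          simp [hvB, haB, hsB, ← pvIdxAB]

-- ===== VERDICT (by name: the statement is the Claim_ definition above) =====
theorem filter_streams_by_language_spec : Claim_equal_filter_streams_by_language := by
  intro streams allowed_langs _ _
  unfold Spec_filter_streams_by_language filter_streams_by_language filter_streams_by_language_alt
  rw [foldA_spec]
  simp
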